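-- pv_equiv track=rewrite | github.com/hsp-iit/byogg | src/utils/misc.py | find_monotonous_subsequences
-- ===== SOURCE A (Python) =====
-- def find_monotonous_subsequences(arr):
--     subsequences = []
--     start = 0
--
--     for i in range(1, len(arr)):
--         if arr[i] <= arr[i - 1]:
--             if i - start > 1:
--                 subsequences.append((start, i - 1))
--             start = i
--
--     # Check if the last subsequence extends till the end of the array
--     if len(arr) - start > 1:
--         subsequences.append((start, len(arr) - 1))
--
--     return subsequences
-- ===== SOURCE B (Python) =====
-- def find_monotonous_subsequences(arr):
--     n = len(arr)
--     bounds = [0] + [i for i in range(1, n) if arr[i] <= arr[i - 1]] + [n]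
--     return [(s, e - 1) for s, e in zip(bounds, bounds[1:]) if e - s > 1]
-- ===== Notes on version B (the rewrite author's own statement) =====
-- stated objective: alternative
-- what changed: B first precomputes the list of run boundaries (zero, the break indices, and a len(arr) sentinel) and then emits (start, end) pairs from consecutive boundary pairs, instead of A's single scan with an in-loop emit plus a post-loop tail fix-up.
import Mathlib
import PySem

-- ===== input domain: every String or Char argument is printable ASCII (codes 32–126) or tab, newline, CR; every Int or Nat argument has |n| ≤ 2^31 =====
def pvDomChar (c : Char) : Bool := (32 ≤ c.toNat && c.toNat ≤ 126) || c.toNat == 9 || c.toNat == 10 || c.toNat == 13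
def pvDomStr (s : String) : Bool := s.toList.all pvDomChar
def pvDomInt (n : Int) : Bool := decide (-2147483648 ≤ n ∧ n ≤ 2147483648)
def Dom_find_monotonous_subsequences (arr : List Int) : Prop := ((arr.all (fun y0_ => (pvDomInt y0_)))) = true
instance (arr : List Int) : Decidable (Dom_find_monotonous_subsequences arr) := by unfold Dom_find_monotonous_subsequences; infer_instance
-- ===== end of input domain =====

-- B separates the scan into a precomputed boundary list plus a pass over consecutive
-- boundary pairs (objective: alternative decomposition, same linear cost).

-- ===== PORT A =====
def find_monotonous_subsequences (arr : List Int) : List (Int × Int) :=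
  let n : Int := arr.length
  let st := (PySem.List.pyRange 1 n 1).foldl
    (fun (st : List (Int × Int) × Int) i =>
      if PySem.List.pyGetD arr i 0 ≤ PySem.List.pyGetD arr (i - 1) 0 then
        ((if i - st.2 > 1 then st.1 ++ [(st.2, i - 1)] else st.1), i)
      else st) ([], 0)
  if n - st.2 > 1 then st.1 ++ [(st.2, n - 1)] else st.1

-- ===== PORT B =====
def find_monotonous_subsequences_alt (arr : List Int) : List (Int × Int) :=
  let n : Int := arr.length
  let bounds : List Int := [0] ++ (PySem.List.pyRange 1 n 1).filter
      (fun i => PySem.List.pyGetD arr i 0 ≤ PySem.List.pyGetD arr (i - 1) 0) ++ [n]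
  (bounds.zip bounds.tail).filterMap
    (fun p => if p.2 - p.1 > 1 then some (p.1, p.2 - 1) else none)

-- ===== PRECONDITION & SPEC =====
def Spec_find_monotonous_subsequences (arr : List Int) (out : List (Int × Int)) : Prop := out = find_monotonous_subsequences_alt arr
instance (arr : List Int) (out : List (Int × Int)) : Decidable (Spec_find_monotonous_subsequences arr out) := by unfold Spec_find_monotonous_subsequences; infer_instance

-- ===== CLAIM (what is proved, stated in full; the proofs are below) =====
def Claim_equal_find_monotonous_subsequences : Prop := ∀ (arr : List Int), Dom_find_monotonous_subsequences arr → Spec_find_monotonous_subsequences arr (find_monotonous_subsequences arr)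

-- ===== LEMMAS AND PROOFS =====

/-- Runs emitted from a start boundary `s` and the list of following boundaries. -/
def emitRuns : Int → List Int → List (Int × Int)
  | _, [] => []
  | s, e :: rest => (if e - s > 1 then [(s, e - 1)] else []) ++ emitRuns e rest

theorem foldl_emitRuns (p : Int → Prop) [DecidablePred p] (L : List Int) (acc : List (Int × Int)) (s : Int) :
    L.foldl
      (fun (st : List (Int × Int) × Int) i =>
        if p i then ((if i - st.2 > 1 then st.1 ++ [(st.2, i - 1)] else st.1), i) else st)
      (acc, s)
    = (acc ++ emitRuns s (L.filter (fun i => decide (p i))),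
       (L.filter (fun i => decide (p i))).getLastD s) := by
  induction L generalizing acc s with
  | nil => simp [emitRuns]
  | cons i rest ih =>
    rw [List.foldl_cons, List.filter_cons]
    by_cases h : p i
    · have hd : decide (p i) = true := by simpa using h
      rw [if_pos h, if_pos hd, ih, List.getLastD_cons]
      conv_rhs => rw [emitRuns]
      rw [← List.append_assoc]
      split_ifs <;> simp
    · simp [h, ih]

theorem zip_emitRuns (l : List Int) (s : Int) :
    ((s :: l).zip l).filterMap
      (fun p => if p.2 - p.1 > 1 then some (p.1, p.2 - 1) else none)
    = emitRuns s l := by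
  induction l generalizing s with
  | nil => simp [emitRuns]
  | cons e rest ih =>
    simp only [List.zip_cons_cons, List.filterMap_cons, emitRuns, ← ih]
    split_ifs <;> simp

theorem emitRuns_append_singleton (l : List Int) (s n : Int) :
    emitRuns s (l ++ [n])
    = emitRuns s l ++ (if n - l.getLastD s > 1 then [(l.getLastD s, n - 1)] else []) := by
  induction l generalizing s with
  | nil => simp [emitRuns]
  | cons e rest ih =>
    simp only [List.cons_append, emitRuns, ih, List.getLastD_cons, List.append_assoc]

-- ===== VERDICT (by name: the statement is the Claim_ definition above) =====
theorem find_monotonous_subsequences_spec : Claim_equal_find_monotonous_subsequences := by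
  intro arr _
  unfold Spec_find_monotonous_subsequences
  simp only [find_monotonous_subsequences, find_monotonous_subsequences_alt]
  rw [foldl_emitRuns (fun i => PySem.List.pyGetD arr i 0 ≤ PySem.List.pyGetD arr (i - 1) 0)]
  simp only [List.cons_append, List.nil_append, List.tail_cons, zip_emitRuns,
    emitRuns_append_singleton]
  split_ifs <;> simp
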